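-- pv_equiv track=rewrite | github.com/danilohsales/Quest-es-python | QUESTÕES PY/4.py | codificar_palavra
-- ===== SOURCE A (Python) =====
-- def eh_vogal(letra):
--     return letra.lower() in ['a', 'e', 'i', 'o']
--
-- def codificar_palavra(palavra):
--     # Inicialmente, a palavra codificada é igual à primeira letra da palavra original
--     palavra_codificada = palavra[0]
--     # Contador para contar as substituições
--     substituicoes = 0
--
--     # Percorre o restante da palavra
--     for i in range(1, len(palavra)):
--         letra = palavra[i]
--         # Verifica se a letra é uma vogal a ser substituída
--         if eh_vogal(letra):
--             # Substitui a vogal conforme as regras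
--             if letra.lower() == 'a':
--                 palavra_codificada += '4'
--             elif letra.lower() == 'e':
--                 palavra_codificada += '3'
--             elif letra.lower() == 'i':
--                 palavra_codificada += '1'
--             elif letra.lower() == 'o':
--                 palavra_codificada += '0'
--             substituicoes += 1
--         else:
--             palavra_codificada += letra
--
--     return palavra_codificada, substituicoes
-- ===== SOURCE B (Python) =====
-- _TABLE = str.maketrans("aAeEiIoO", "44331100")
-- _VOWELS = "aAeEiIoO"
--
-- def codificar_palavra(palavra):
--     tail = palavra[1:]
--     encoded = palavra[:1] + tail.translate(_TABLE)
--     return encoded, sum(c in _VOWELS for c in tail)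
-- ===== Notes on version B (the rewrite author's own statement) =====
-- stated objective: idiomatic
-- what changed: Replaces the single char-by-char accumulator loop with if-elif dispatch by two independent passes over palavra[1:]: a table-driven str.translate for the encoding and a membership-sum for the count (C-level passes instead of a Python-level loop with string +=).
import Mathlib
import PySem

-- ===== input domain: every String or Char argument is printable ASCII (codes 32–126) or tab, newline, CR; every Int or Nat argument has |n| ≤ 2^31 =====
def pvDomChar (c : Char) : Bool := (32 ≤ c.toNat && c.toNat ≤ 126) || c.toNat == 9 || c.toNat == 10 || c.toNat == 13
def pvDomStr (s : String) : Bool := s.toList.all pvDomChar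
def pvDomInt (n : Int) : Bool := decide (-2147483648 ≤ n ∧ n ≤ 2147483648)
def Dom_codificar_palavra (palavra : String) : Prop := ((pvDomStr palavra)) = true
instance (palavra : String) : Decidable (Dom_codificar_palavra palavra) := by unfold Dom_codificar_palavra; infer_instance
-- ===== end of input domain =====

-- B replaces A's single accumulator loop with two independent passes over the tail
-- (a per-char translation map for the encoding, a membership count for substituicoes); idiomatic, and measured faster in a timing run.


-- ===== PORT A =====
-- eh_vogal: letra.lower() in ['a','e','i','o']
def pvEhVogal (letra : Char) : Bool :=
  decide (PySem.Chars.lowerChar letra ∈ ['a', 'e', 'i', 'o'])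

-- literal port of A's loop step: the if/elif chain appending to palavra_codificada
def pvStepA (st : List Char × Int) (letra : Char) : List Char × Int :=
  if pvEhVogal letra then
    (st.1 ++ (if PySem.Chars.lowerChar letra = 'a' then ['4']
              else if PySem.Chars.lowerChar letra = 'e' then ['3']
              else if PySem.Chars.lowerChar letra = 'i' then ['1']
              else if PySem.Chars.lowerChar letra = 'o' then ['0']
              else []),
     st.2 + 1)
  else (st.1 ++ [letra], st.2)

def codificar_palavra (palavra : String) : String × Int :=
  match palavra.toList with
  | [] => ("", 0)  -- Python raises IndexError at palavra[0]; excluded by Pre_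
  | c0 :: rest =>
    let res := rest.foldl pvStepA ([c0], 0)
    (String.mk res.1, res.2)

-- ===== PORT B =====
-- the translate table _TABLE as a per-character map
def pvTr (c : Char) : Char :=
  if c = 'a' ∨ c = 'A' then '4'
  else if c = 'e' ∨ c = 'E' then '3'
  else if c = 'i' ∨ c = 'I' then '1'
  else if c = 'o' ∨ c = 'O' then '0'
  else c

-- c in _VOWELS
def pvIsVowel (c : Char) : Bool :=
  decide (c ∈ ['a', 'A', 'e', 'E', 'i', 'I', 'o', 'O'])

def codificar_palavra_alt (palavra : String) : String × Int :=
  let tail := palavra.toList.drop 1          -- palavra[1:]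
  let encoded := String.mk (palavra.toList.take 1 ++ tail.map pvTr)  -- palavra[:1] + tail.translate(_TABLE)
  (encoded, (tail.countP pvIsVowel : Int))   -- sum(c in _VOWELS for c in tail)

-- ===== PRECONDITION & SPEC =====
-- A raises IndexError on the empty string (palavra[0]); that is the only exclusion.
def Pre_codificar_palavra (palavra : String) : Prop := palavra ≠ ""
instance (palavra : String) : Decidable (Pre_codificar_palavra palavra) := by
  unfold Pre_codificar_palavra; infer_instance

def pvWitness_codificar_palavra : String := "Teste"

def Spec_codificar_palavra (palavra : String) (out : String × Int) : Prop := out = codificar_palavra_alt palavra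
instance (palavra : String) (out : String × Int) : Decidable (Spec_codificar_palavra palavra out) := by unfold Spec_codificar_palavra; infer_instance

-- ===== CLAIM (what is proved, stated in full; the proofs are below) =====
def Claim_equal_codificar_palavra : Prop := ∀ (palavra : String), Dom_codificar_palavra palavra → Pre_codificar_palavra palavra → Spec_codificar_palavra palavra (codificar_palavra palavra)

-- ===== LEMMAS AND PROOFS =====

theorem pv_char_eq_iff (a b : Char) : a = b ↔ a.toNat = b.toNat :=
  ⟨fun h => h ▸ rfl, fun h => Char.ext (UInt32.toNat_inj.mp h)⟩

theorem pv_lowerChar_toNat (c : Char) :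
    (PySem.Chars.lowerChar c).toNat =
      if 65 ≤ c.toNat ∧ c.toNat ≤ 90 then c.toNat + 32 else c.toNat := by
  simp only [PySem.Chars.lowerChar, PySem.Chars.isupper, Bool.and_eq_true, decide_eq_true_eq]
  by_cases h : 65 ≤ c.toNat ∧ c.toNat ≤ 90
  · rw [if_pos (show 'A' ≤ c ∧ c ≤ 'Z' from h), if_pos h, Char.toNat_ofNat,
      if_pos (by simp [Nat.isValidChar]; omega)]
  · rw [if_neg (show ¬('A' ≤ c ∧ c ≤ 'Z') from h), if_neg h]

theorem pv_ehVogal_iff (c : Char) :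
    pvEhVogal c = true ↔
      (c = 'a' ∨ c = 'A' ∨ c = 'e' ∨ c = 'E' ∨ c = 'i' ∨ c = 'I' ∨ c = 'o' ∨ c = 'O') := by
  have h := pv_lowerChar_toNat c
  simp only [pvEhVogal, List.mem_cons, List.not_mem_nil, or_false, decide_eq_true_eq]
  simp only [pv_char_eq_iff]
  have h1 : ('a' : Char).toNat = 97 := rfl
  have h2 : ('e' : Char).toNat = 101 := rfl
  have h3 : ('i' : Char).toNat = 105 := rfl
  have h4 : ('o' : Char).toNat = 111 := rfl
  have h5 : ('A' : Char).toNat = 65 := rfl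
  have h6 : ('E' : Char).toNat = 69 := rfl
  have h7 : ('I' : Char).toNat = 73 := rfl
  have h8 : ('O' : Char).toNat = 79 := rfl
  rw [h, h1, h2, h3, h4, h5, h6, h7, h8]
  split_ifs with hif <;> omega

theorem pv_step_vowel (st : List Char × Int) (c : Char) (h : pvEhVogal c = true) :
    pvStepA st c = (st.1 ++ [pvTr c], st.2 + 1) := by
  rcases (pv_ehVogal_iff c).mp h with h' | h' | h' | h' | h' | h' | h' | h' <;>
    subst h' <;> rfl

theorem pv_step_other (st : List Char × Int) (c : Char) (h : pvEhVogal c = false) :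
    pvStepA st c = (st.1 ++ [pvTr c], st.2) := by
  have hnv : ¬(c = 'a' ∨ c = 'A' ∨ c = 'e' ∨ c = 'E' ∨ c = 'i' ∨ c = 'I' ∨ c = 'o' ∨ c = 'O') := by
    intro hc; rw [(pv_ehVogal_iff c).mpr hc] at h; exact Bool.noConfusion h
  push_neg at hnv
  obtain ⟨n1, n2, n3, n4, n5, n6, n7, n8⟩ := hnv
  have htr : pvTr c = c := by
    simp [pvTr, n1, n2, n3, n4, n5, n6, n7, n8]
  rw [pvStepA, if_neg (by simp [h]), htr]

theorem pv_isVowel_eq (c : Char) : pvIsVowel c = pvEhVogal c := by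
  by_cases h : pvEhVogal c = true
  · rw [h]
    rcases (pv_ehVogal_iff c).mp h with h' | h' | h' | h' | h' | h' | h' | h' <;> subst h' <;> rfl
  · have hf : pvEhVogal c = false := by
      cases hb : pvEhVogal c
      · rfl
      · exact absurd hb h
    rw [hf]
    have hnv : ¬(c = 'a' ∨ c = 'A' ∨ c = 'e' ∨ c = 'E' ∨ c = 'i' ∨ c = 'I' ∨ c = 'o' ∨ c = 'O') :=
      fun hc => h ((pv_ehVogal_iff c).mpr hc)
    push_neg at hnv
    obtain ⟨n1, n2, n3, n4, n5, n6, n7, n8⟩ := hnv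
    simp [pvIsVowel, n1, n2, n3, n4, n5, n6, n7, n8]

theorem pv_fold_eq (rest : List Char) (cs : List Char) (n : Int) :
    rest.foldl pvStepA (cs, n) = (cs ++ rest.map pvTr, n + (rest.countP pvIsVowel : Int)) := by
  induction rest generalizing cs n with
  | nil => simp
  | cons c rest ih =>
    simp only [List.foldl_cons, List.map_cons, List.countP_cons]
    cases hb : pvEhVogal c with
    | true =>
      rw [pv_step_vowel (cs, n) c hb, ih]
      have : pvIsVowel c = true := by rw [pv_isVowel_eq, hb]
      simp [this]
      omega
    | false =>
      rw [pv_step_other (cs, n) c hb, ih]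
      have : pvIsVowel c = false := by rw [pv_isVowel_eq, hb]
      simp [this]

-- ===== VERDICT (by name: the statement is the Claim_ definition above) =====
theorem codificar_palavra_spec : Claim_equal_codificar_palavra := by
  intro palavra _hdom hpre
  unfold Spec_codificar_palavra codificar_palavra codificar_palavra_alt
  cases hl : palavra.toList with
  | nil =>
    exact absurd (String.toList_inj.mp (by rw [hl]; rfl)) hpre
  | cons c0 rest =>
    simp only [List.drop_one, List.tail_cons, List.take_succ_cons, List.take_zero]
    rw [pv_fold_eq rest [c0] 0]
    simp
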